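-- pv_equiv track=rewrite | github.com/sunhanaix/SyncXiaomiCloud | Chrome.py | get_father_domain
-- ===== SOURCE A (Python) =====
-- def get_father_domain(
--         full_domain):  # 给定类似testcase.software.ibm.com域名的字串，返回['testcase.software.ibm.com','.software.ibm.com','.ibm.com','.com']
--     items = full_domain.split('.')
--     N = len(items)
--     res = []
--     for i in range(N):
--         one_item = []
--         for j in range(i, N):
--             one_item.append(items[j])
--         one_domain = ".".join(one_item)
--         if one_domain == full_domain:
--             res.append(one_domain)
--         else:
--             res.append('.' + one_domain)
--     return res
-- ===== SOURCE B (Python) =====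
-- def get_father_domain(full_domain):
--     res = [full_domain]
--     for k, c in enumerate(full_domain):
--         if c == '.':
--             res.append(full_domain[k:])
--     return res
-- ===== Notes on version B (the rewrite author's own statement) =====
-- stated objective: idiomatic
-- what changed: Replaces A's dot-splitting plus a quadratic nest (rebuild the sublist items[i:] element by element and join it for every i) by a single left-to-right scan that appends the suffix starting at each dot character.
import Mathlib
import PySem

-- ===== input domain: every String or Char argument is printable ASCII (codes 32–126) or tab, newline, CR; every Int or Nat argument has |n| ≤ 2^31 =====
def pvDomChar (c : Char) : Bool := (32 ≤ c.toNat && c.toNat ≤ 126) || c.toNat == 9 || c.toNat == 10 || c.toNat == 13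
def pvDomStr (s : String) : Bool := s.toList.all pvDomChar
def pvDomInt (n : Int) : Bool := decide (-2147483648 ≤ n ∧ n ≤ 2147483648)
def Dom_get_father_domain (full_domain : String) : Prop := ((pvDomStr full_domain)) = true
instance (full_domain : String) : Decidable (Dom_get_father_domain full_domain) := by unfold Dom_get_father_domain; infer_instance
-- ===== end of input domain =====

-- B replaces A's split/nested-join construction by a single scan collecting the suffix at each dot (idiomatic; return value only, no mutation involved).

-- ===== PORT A =====
-- computed on code-point lists (PySem.Chars are the exact definitions); strings rebuilt at the boundary
def get_father_domain (full_domain : String) : List String :=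
  let items : List (List Char) := PySem.Chars.splitOn full_domain.toList ['.']  -- full_domain.split('.')
  let N : Nat := items.length
  let res : List (List Char) :=
    (PySem.List.pyRange 0 (N : Int) 1).foldl (fun res i =>
      let one_item : List (List Char) :=
        (PySem.List.pyRange i (N : Int) 1).foldl
          (fun one_item j => one_item ++ [PySem.List.pyGetD items j []]) []
      let one_domain : List Char := PySem.Chars.join ['.'] one_item
      if one_domain = full_domain.toList then res ++ [one_domain]
      else res ++ [('.' :: one_domain)]) []
  res.map String.ofList

-- ===== PORT B =====
def get_father_domain_alt (full_domain : String) : List String :=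
  let cs : List Char := full_domain.toList
  let res : List (List Char) :=
    (PySem.List.enumerate cs 0).foldl (fun res kc =>
      if kc.2 = '.' then res ++ [PySem.List.slice cs (some kc.1) none] else res) [cs]
  res.map String.ofList

-- ===== PRECONDITION & SPEC =====
def Spec_get_father_domain (full_domain : String) (out : List String) : Prop := out = get_father_domain_alt full_domain
instance (full_domain : String) (out : List String) : Decidable (Spec_get_father_domain full_domain out) := by unfold Spec_get_father_domain; infer_instance

-- ===== CLAIM (what is proved, stated in full; the proofs are below) =====
def Claim_equal_get_father_domain : Prop := ∀ (full_domain : String), Dom_get_father_domain full_domain → Spec_get_father_domain full_domain (get_father_domain full_domain)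

-- ===== LEMMAS AND PROOFS =====

-- structural recharacterisation of split('.') on code-point lists
def mySplit : List Char → List (List Char)
  | [] => [[]]
  | c :: rest => if c = '.' then [] :: mySplit rest else (mySplit rest).modifyHead (c :: ·)

-- '.'.join, structurally
def myJoin : List (List Char) → List Char
  | [] => []
  | [a] => a
  | a :: b :: t => a ++ '.' :: myJoin (b :: t)

-- the dotted-suffix list A appends after the full domain
def gSuf : List (List Char) → List (List Char)
  | [] => []
  | l :: t => ('.' :: myJoin (l :: t)) :: gSuf t

-- the suffixes starting at each '.' of cs, in order (B's view)
def dsuf : List Char → List (List Char)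
  | [] => []
  | c :: rest => (if c = '.' then [c :: rest] else []) ++ dsuf rest

theorem mySplit_ne_nil (cs : List Char) : mySplit cs ≠ [] := by
  cases cs with
  | nil => simp [mySplit]
  | cons c rest =>
    simp only [mySplit]
    split
    · simp
    · cases h : mySplit rest with
      | nil => exact absurd h (mySplit_ne_nil rest)
      | cons a t => simp

theorem mySplit_cons (c : Char) (rest : List Char) :
    mySplit (c :: rest) = if c = '.' then [] :: mySplit rest else (mySplit rest).modifyHead (c :: ·) := rfl

set_option maxRecDepth 8192 in
theorem splitOn_go_spec (l : List Char) : ∀ (fuel : Nat) (cur : List Char) (acc : List (List Char)),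
    l.length < fuel →
    PySem.Chars.splitOn.go ['.'] fuel l cur acc
      = acc.reverse ++ (mySplit l).modifyHead (cur.reverse ++ ·) := by
  induction l with
  | nil =>
    intro fuel cur acc h
    match fuel, h with
    | fuel + 1, _ => simp [PySem.Chars.splitOn.go, mySplit]
  | cons c rest ih =>
    intro fuel cur acc h
    match fuel, h with
    | fuel + 1, h =>
      simp only [PySem.Chars.splitOn.go]
      by_cases hc : c = '.'
      · subst hc
        rw [if_pos (by simp [List.isPrefixOf])]
        simp only [List.length_cons, List.length_nil, List.drop_succ_cons, List.drop_zero]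
        rw [ih fuel [] (cur.reverse :: acc) (by simpa using h)]
        cases hms : mySplit rest with
        | nil => exact absurd hms (mySplit_ne_nil rest)
        | cons a t =>
          rw [mySplit_cons, if_pos rfl, hms]
          simp only [List.reverse_cons, List.modifyHead, List.append_assoc, List.append_nil,
            List.nil_append, List.modifyHead_cons]
          simp
      · rw [if_neg (by simp only [List.isPrefixOf, Bool.and_eq_true, beq_iff_eq]; exact fun h => hc h.1.symm)]
        rw [ih fuel (c :: cur) acc (by simpa using h)]
        cases hms : mySplit rest with
        | nil => exact absurd hms (mySplit_ne_nil rest)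
        | cons a t =>
          rw [mySplit_cons, if_neg hc, hms]
          simp

theorem splitOn_eq_mySplit (cs : List Char) : PySem.Chars.splitOn cs ['.'] = mySplit cs := by
  unfold PySem.Chars.splitOn
  rw [splitOn_go_spec cs (cs.length + 1) [] [] (by omega)]
  cases h : mySplit cs with
  | nil => exact absurd h (mySplit_ne_nil cs)
  | cons a t => simp

theorem join_eq_myJoin (parts : List (List Char)) : PySem.Chars.join ['.'] parts = myJoin parts := by
  match parts with
  | [] => simp [PySem.Chars.join_nil, myJoin]
  | [a] => simp [PySem.Chars.join_singleton, myJoin]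
  | a :: b :: t =>
    rw [PySem.Chars.join_cons_cons, join_eq_myJoin (b :: t)]
    simp [myJoin]

theorem myJoin_modifyHead (c : Char) (h : List Char) (t : List (List Char)) :
    myJoin ((h :: t).modifyHead (c :: ·)) = c :: myJoin (h :: t) := by
  cases t <;> simp [myJoin]

theorem myJoin_mySplit (cs : List Char) : myJoin (mySplit cs) = cs := by
  induction cs with
  | nil => simp [mySplit, myJoin]
  | cons c rest ih =>
    by_cases hc : c = '.'
    · subst hc
      have h2 : myJoin (mySplit rest) = rest := ih
      cases h : mySplit rest with
      | nil => exact absurd h (mySplit_ne_nil rest)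
      | cons a t =>
        rw [h] at h2
        simp [mySplit, h, myJoin, h2]
    · cases h : mySplit rest with
      | nil => exact absurd h (mySplit_ne_nil rest)
      | cons a t =>
        simp only [mySplit, if_neg hc, h, myJoin_modifyHead]
        rw [← ih, h]

theorem myJoin_drop_length_lt (items : List (List Char)) (k : Nat)
    (hk : 0 < k) (hlt : k < items.length) :
    (myJoin (items.drop k)).length < (myJoin items).length := by
  match items, k with
  | l :: t, 1 =>
    have ht : t ≠ [] := by intro h; subst h; simp at hlt
    match t with
    | b :: t' => simp [myJoin]; omega
  | l :: t, k + 2 =>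
    have ht : t ≠ [] := by intro h; subst h; simp at hlt
    match t with
    | b :: t' =>
      have := myJoin_drop_length_lt (b :: t') (k + 1) (by omega) (by simpa using hlt)
      simp only [List.drop_succ_cons] at *
      simp [myJoin]
      omega

-- A's fold computes cs followed by gSuf of the tail of the split
theorem gSuf_eq_dsuf (cs : List Char) : gSuf (mySplit cs).tail = dsuf cs := by
  induction cs with
  | nil => simp [mySplit, gSuf, dsuf]
  | cons c rest ih =>
    by_cases hc : c = '.'
    · subst hc
      cases h : mySplit rest with
      | nil => exact absurd h (mySplit_ne_nil rest)
      | cons a t =>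
        have h2 : myJoin (a :: t) = rest := by rw [← h, myJoin_mySplit]
        have h3 := ih
        rw [h] at h3
        simp only [List.tail_cons] at h3
        simp [mySplit, h, dsuf, gSuf, h2, h3]
    · cases h : mySplit rest with
      | nil => exact absurd h (mySplit_ne_nil rest)
      | cons a t =>
        simp only [mySplit, if_neg hc, h, List.modifyHead, List.tail_cons, dsuf, hc]
        rw [← ih, h]
        simp

theorem foldl_concat_id (l acc : List (List Char)) :
    l.foldl (fun a x => a ++ [x]) acc = acc ++ l := by
  induction l generalizing acc with
  | nil => simp
  | cons x t ih => simp [List.foldl_cons, ih, List.append_assoc]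

-- B's fold collects exactly the dotted suffixes
theorem b_fold_spec (cs0 : List Char) : ∀ (cs : List Char) (k : Nat) (acc : List (List Char)),
    cs0.drop k = cs →
    (PySem.List.enumerate cs (k : Int)).foldl (fun res kc =>
        if kc.2 = '.' then res ++ [PySem.List.slice cs0 (some kc.1) none] else res) acc
      = acc ++ dsuf cs := by
  intro cs
  induction cs with
  | nil => intro k acc h; simp [PySem.List.enumerate_nil, dsuf]
  | cons c rest ih =>
    intro k acc h
    rw [PySem.List.enumerate_cons]
    simp only [List.foldl_cons]
    have hrest : cs0.drop (k + 1) = rest := by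
      rw [← List.drop_drop (i := 1) (j := k)]
      simp [h]
    have hk1 : ((k : Int) + 1) = ((k + 1 : Nat) : Int) := by push_cast; ring
    by_cases hc : c = '.'
    · rw [if_pos hc, hk1, ih (k + 1) _ hrest]
      rw [PySem.List.slice_from_natCast, h]
      simp [dsuf, hc]
    · rw [if_neg hc, hk1, ih (k + 1) _ hrest]
      simp [dsuf, hc]

theorem flatMap_congr_mem' {α β : Type} (l : List α) (f g : α → List β)
    (h : ∀ x ∈ l, f x = g x) : l.flatMap f = l.flatMap g := by
  induction l with
  | nil => rfl
  | cons x t ih =>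
    simp only [List.flatMap_cons]
    rw [h x (by simp), ih (fun y hy => h y (by simp [hy]))]

theorem rangeMap_eq_gSuf (t : List (List Char)) :
    (List.range t.length).map (fun k => ('.' :: myJoin (t.drop k) : List Char)) = gSuf t := by
  induction t with
  | nil => simp [gSuf]
  | cons b t' ih =>
    rw [List.length_cons, List.range_succ_eq_map, List.map_cons, List.map_map]
    simp only [Function.comp_def, List.drop_succ_cons, List.drop_zero]
    rw [ih]
    rfl

theorem flatMap_singleton_map {α β : Type} (l : List α) (g : α → List β) :
    l.flatMap (fun x => [g x]) = l.map g := by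
  induction l with
  | nil => rfl
  | cons x t ih => simp [List.flatMap_cons, ih]

-- A's fold, rewritten to a map over range, then to cs :: gSuf tail
theorem a_fold_spec (cs : List Char) :
    ((PySem.List.pyRange 0 ((mySplit cs).length : Int) 1).foldl (fun res i =>
        let one_item : List (List Char) :=
          (PySem.List.pyRange i ((mySplit cs).length : Int) 1).foldl
            (fun one_item j => one_item ++ [PySem.List.pyGetD (mySplit cs) j []]) []
        let one_domain : List Char := PySem.Chars.join ['.'] one_item
        if one_domain = cs then res ++ [one_domain]
        else res ++ [('.' :: one_domain)]) [])
      = cs :: gSuf (mySplit cs).tail := by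
  have hfun : (fun (res : List (List Char)) (i : Int) =>
        let one_item : List (List Char) :=
          (PySem.List.pyRange i ((mySplit cs).length : Int) 1).foldl
            (fun one_item j => one_item ++ [PySem.List.pyGetD (mySplit cs) j []]) []
        let one_domain : List Char := PySem.Chars.join ['.'] one_item
        if one_domain = cs then res ++ [one_domain]
        else res ++ [('.' :: one_domain)])
      = (fun (res : List (List Char)) (i : Int) => res ++
          (let one_domain : List Char := PySem.Chars.join ['.']
              ((PySem.List.pyRange i ((mySplit cs).length : Int) 1).foldl
                (fun one_item j => one_item ++ [PySem.List.pyGetD (mySplit cs) j []]) [])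
           if one_domain = cs then [one_domain] else [('.' :: one_domain)])) := by
    funext res i
    simp only
    split <;> rfl
  rw [hfun, PySem.List.foldl_append_eq_flatMap, List.nil_append]
  rw [PySem.List.pyRange_one, List.flatMap_map]
  simp only [sub_zero, Int.toNat_natCast, zero_add, Function.comp_def]
  have hinner : ∀ k : Nat, k < (mySplit cs).length →
      ((PySem.List.pyRange (k : Int) ((mySplit cs).length : Int) 1).foldl
          (fun one_item j => one_item ++ [PySem.List.pyGetD (mySplit cs) j []]) [])
        = (mySplit cs).drop k := by
    intro k hk
    rw [PySem.List.foldl_pyRange_pyGetD' (mySplit cs) [] (fun acc x => acc ++ [x]) [] (Int.natCast_nonneg k)]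
    rw [foldl_concat_id]
    simp
  have hpt : ∀ k ∈ List.range (mySplit cs).length,
      (let one_domain : List Char := PySem.Chars.join ['.']
          ((PySem.List.pyRange (k : Int) ((mySplit cs).length : Int) 1).foldl
            (fun one_item j => one_item ++ [PySem.List.pyGetD (mySplit cs) j []]) [])
       if one_domain = cs then ([one_domain] : List (List Char)) else [('.' :: one_domain)])
        = if k = 0 then [cs] else [('.' :: myJoin ((mySplit cs).drop k))] := by
    intro k hk
    rw [List.mem_range] at hk
    simp only [hinner k hk, join_eq_myJoin]
    by_cases hk0 : k = 0
    · subst hk0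
      simp [myJoin_mySplit]
    · have hne : myJoin ((mySplit cs).drop k) ≠ cs := by
        intro he
        have hlt := myJoin_drop_length_lt (mySplit cs) k (Nat.pos_of_ne_zero hk0) hk
        rw [he, myJoin_mySplit] at hlt
        omega
      simp [hne, hk0]
  rw [flatMap_congr_mem' _ _ _ hpt]
  cases hms : mySplit cs with
  | nil => exact absurd hms (mySplit_ne_nil cs)
  | cons l t =>
    rw [List.length_cons, List.range_succ_eq_map, List.flatMap_cons, List.flatMap_map]
    simp only [Nat.succ_ne_zero, if_neg, if_pos rfl, Nat.add_eq_zero, and_false,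
      if_false, List.drop_succ_cons, List.tail_cons]
    rw [flatMap_singleton_map]
    rw [rangeMap_eq_gSuf]
    rfl

theorem get_father_domain_spec : Claim_equal_get_father_domain := by
  intro full_domain _
  unfold Spec_get_father_domain get_father_domain get_father_domain_alt
  simp only [splitOn_eq_mySplit]
  rw [a_fold_spec full_domain.toList]
  have hb := b_fold_spec full_domain.toList full_domain.toList 0 [full_domain.toList] (by simp)
  simp only [Nat.cast_zero] at hb
  rw [hb, gSuf_eq_dsuf]
  rfl
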